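-- pv_equiv track=rewrite | github.com/kerncl/leetcode | python/codility/MaxNonOverLappingSegments.py | solution
-- ===== SOURCE A (Python) =====
-- def solution(a, b):
--     overall = []
--     for i in range(len(a)):
--         non_overlap = [i]
--         while i < len(a):
--             if a[i] > b[i-1]:
--                 non_overlap.append(i)
--             i += 1
--
--
--         if len(non_overlap) > 1:
--             overall.append(non_overlap)
--     return overall
-- ===== SOURCE B (Python) =====
-- def solution(a, b):
--     n = len(a)
--     q = [j for j in range(n) if a[j] > b[j - 1]]
--     overall = []
--     for i in range(n):
--         non_overlap = [i] + [j for j in q if j >= i]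
--         if len(non_overlap) > 1:
--             overall.append(non_overlap)
--     return overall
-- ===== Notes on version B (the rewrite author's own statement) =====
-- stated objective: faster
-- what changed: B precomputes the qualifying-index list q once and builds each i's list by filtering q, instead of A's per-i rescan of the whole array.
import Mathlib
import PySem

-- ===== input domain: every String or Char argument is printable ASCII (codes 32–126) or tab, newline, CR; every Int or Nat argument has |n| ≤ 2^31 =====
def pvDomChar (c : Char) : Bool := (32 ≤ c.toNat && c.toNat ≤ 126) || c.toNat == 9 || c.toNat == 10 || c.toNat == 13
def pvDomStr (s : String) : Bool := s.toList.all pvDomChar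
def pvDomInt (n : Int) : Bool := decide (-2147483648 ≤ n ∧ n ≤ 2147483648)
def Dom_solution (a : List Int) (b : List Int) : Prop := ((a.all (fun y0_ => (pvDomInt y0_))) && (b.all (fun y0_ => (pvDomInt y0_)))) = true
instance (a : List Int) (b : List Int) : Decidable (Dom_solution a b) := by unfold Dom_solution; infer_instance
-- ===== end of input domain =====

-- B precomputes the qualifying-index list once and filters it per start index, instead of A's per-i rescan (objective: faster by a constant-factor mechanism).

-- ===== PORT A =====
-- pyGetD is in range under Pre_solution (b[j-1] with Python's negative-index rule for j = 0)
def solution (a : List Int) (b : List Int) : List (List Int) :=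
  (PySem.List.pyRange 0 a.length 1).foldl (fun overall i =>
    let non_overlap := (PySem.List.pyRange i a.length 1).foldl
      (fun no j => if PySem.List.pyGetD a j 0 > PySem.List.pyGetD b (j - 1) 0 then no ++ [j] else no) [i]
    if 1 < non_overlap.length then overall ++ [non_overlap] else overall) []

-- ===== PORT B =====
def solution_alt (a : List Int) (b : List Int) : List (List Int) :=
  let q := (PySem.List.pyRange 0 a.length 1).filter
    (fun j => PySem.List.pyGetD a j 0 > PySem.List.pyGetD b (j - 1) 0)
  (PySem.List.pyRange 0 a.length 1).foldl (fun overall i =>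
    let non_overlap := i :: q.filter (fun j => i ≤ j)
    if 1 < non_overlap.length then overall ++ [non_overlap] else overall) []

-- ===== PRECONDITION & SPEC =====
-- Pre_ excludes exactly the inputs where the b[j-1] accesses raise IndexError in both programs:
-- a nonempty with b empty (b[-1]) or len(a) > len(b) + 1.
def Pre_solution (a : List Int) (b : List Int) : Prop :=
  a = [] ∨ (b ≠ [] ∧ a.length ≤ b.length + 1)
instance (a : List Int) (b : List Int) : Decidable (Pre_solution a b) := by unfold Pre_solution; infer_instance
def pvWitness_solution : List Int × List Int := ([3, 1, 4], [2, 2, 0])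

def Spec_solution (a : List Int) (b : List Int) (out : List (List Int)) : Prop := out = solution_alt a b
instance (a : List Int) (b : List Int) (out : List (List Int)) : Decidable (Spec_solution a b out) := by unfold Spec_solution; infer_instance

-- ===== CLAIM (what is proved, stated in full; the proofs are below) =====
def Claim_equal_solution : Prop := ∀ (a : List Int) (b : List Int), Dom_solution a b → Pre_solution a b → Spec_solution a b (solution a b)

-- ===== LEMMAS AND PROOFS =====

-- A's inner scan from i equals B's "i consed onto the ≥ i part of the precomputed list q".
lemma inner_eq (a b : List Int) (i : Int) (h0 : 0 ≤ i) (hn : i ≤ (a.length : Int)) :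
    (PySem.List.pyRange i a.length 1).foldl
      (fun no j => if PySem.List.pyGetD a j 0 > PySem.List.pyGetD b (j - 1) 0 then no ++ [j] else no) [i]
    = i :: ((PySem.List.pyRange 0 a.length 1).filter
        (fun j => PySem.List.pyGetD a j 0 > PySem.List.pyGetD b (j - 1) 0)).filter (fun j => i ≤ j) := by
  rw [PySem.List.foldl_append_ite_eq_filter]
  rw [PySem.List.pyRange_one_append 0 i (a.length : Int) h0 hn, List.filter_append, List.filter_append]
  have h1 : (((PySem.List.pyRange 0 i 1).filter
      (fun j => PySem.List.pyGetD a j 0 > PySem.List.pyGetD b (j - 1) 0)).filter (fun j => i ≤ j)) = [] := by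
    rw [List.filter_eq_nil_iff]
    intro x hx
    have := PySem.List.mem_pyRange_one.mp (List.mem_of_mem_filter hx)
    simp
    omega
  have h2 : (((PySem.List.pyRange i (a.length : Int) 1).filter
      (fun j => PySem.List.pyGetD a j 0 > PySem.List.pyGetD b (j - 1) 0)).filter (fun j => i ≤ j))
      = (PySem.List.pyRange i (a.length : Int) 1).filter
        (fun j => PySem.List.pyGetD a j 0 > PySem.List.pyGetD b (j - 1) 0) := by
    apply List.filter_eq_self.mpr
    intro x hx
    have := PySem.List.mem_pyRange_one.mp (List.mem_of_mem_filter hx)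
    simp
    omega
  rw [h1, h2]
  simp

-- ===== VERDICT (by name: the statement is the Claim_ definition above) =====
theorem solution_spec : Claim_equal_solution := by
  intro a b _ _
  unfold Spec_solution solution solution_alt
  apply PySem.List.foldl_congr_mem
  intro acc i hi
  have hmem := PySem.List.mem_pyRange_one.mp hi
  rw [inner_eq a b i hmem.1 (le_of_lt hmem.2)]
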